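-- pv_equiv track=rewrite | github.com/paultoster/hometools | python3/projects/tools/hfkt_str.py | elim_comment_not_quoted
-- ===== SOURCE A (Python) =====
-- def get_index_no_quot(text, quot0, quot1):
--     """
--     Gibt Indexpaare (Tuples) in dem der Text nicht gequotet ist z.B.
--
--     text  = "abc {nest} efg  {plab}"
--     #        0123456789012345678901
--     quot0 = "{"
--     quot1 = "}"
--
--     a = get_index_quot(text,quot0,quot1)
--
--     a ergibt [(0,4),(10,16)]
--     """
--     liste = []
--
--     i0 = 0
--     i1 = len(text)
--     #   print "i1 = %i" % i1
--     lq0 = len(quot0)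
--     lq1 = len(quot1)
--
--     istart = 0
--
--     while istart < i1:
--
--         iend = text.find(quot0, istart, i1)
--         #       print "iend = %i" % iend
--         if iend == -1:
--             iend = i1
--
--         tup = (istart, iend)
--         if (istart != iend):
--             liste.append(tup)
--
--         i0 = text.find(quot1, iend + lq0, i1)
--
--         if i0 == -1:
--             istart = i1
--         else:
--             istart = i0 + lq1
--
--     return liste
--
-- def elim_comment_not_quoted(text, comment_liste, quot0, quot1):
--     """
--     eliminiert Kommentar nichtgequoteten aus dem Text, wenn ein Kommentarzeichen
--     aus der Liste comment_list vorkommt z.B.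
--     text = "abc{abc#def} # ddd"
--     tneu = elim_comment_not_quoted(text,["#","%"],"{","}")
--     tneu = "abc{abc#def} "
--     """
--
--     a_liste = get_index_no_quot(text, quot0, quot1)
--     i0 = len(text)
--     #   print "i0= %i" % i0
--     #   print a_liste
--     for a in a_liste:
--         for comment in comment_liste:
--             #           print "a[0]= %i" % a[0]
--             #           print "a[1]= %i" % a[1]
--             b = text.find(comment, a[0], a[1])
--             #           print "b= %i" % b
--             if b > -1:
--                 i0 = min(b, i0)
--     #               print "i0= %i" % i0
--     text1 = text[0:i0]
--     return text1
-- ===== SOURCE B (Python) =====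
-- def elim_comment_not_quoted(text, comment_liste, quot0, quot1):
--     """Single linear scan with early exit: walk the unquoted stretches left to
--     right and cut at the first comment hit, instead of building the full
--     interval list and minimising over all interval/comment pairs."""
--     n = len(text)
--     i = 0
--     while i < n:
--         end = text.find(quot0, i, n)
--         if end == -1:
--             end = n
--         if i != end:
--             best = -1
--             for c in comment_liste:
--                 b = text.find(c, i, end)
--                 if b != -1 and (best == -1 or b < best):
--                     best = b
--             if best != -1:
--                 return text[:best]
--         j = text.find(quot1, end + len(quot0), n)
--         if j == -1:
--             return text
--         i = j + len(quot1)
--     return text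
-- ===== Notes on version B (the rewrite author's own statement) =====
-- stated objective: alternative
-- what changed: B replaces A's two-phase 'build the full list of unquoted intervals, then minimise text.find over every interval x comment pair' with a single left-to-right scan that checks each unquoted stretch as it goes and returns at the first (earliest) unquoted comment hit, never materialising the interval list.
import Mathlib
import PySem

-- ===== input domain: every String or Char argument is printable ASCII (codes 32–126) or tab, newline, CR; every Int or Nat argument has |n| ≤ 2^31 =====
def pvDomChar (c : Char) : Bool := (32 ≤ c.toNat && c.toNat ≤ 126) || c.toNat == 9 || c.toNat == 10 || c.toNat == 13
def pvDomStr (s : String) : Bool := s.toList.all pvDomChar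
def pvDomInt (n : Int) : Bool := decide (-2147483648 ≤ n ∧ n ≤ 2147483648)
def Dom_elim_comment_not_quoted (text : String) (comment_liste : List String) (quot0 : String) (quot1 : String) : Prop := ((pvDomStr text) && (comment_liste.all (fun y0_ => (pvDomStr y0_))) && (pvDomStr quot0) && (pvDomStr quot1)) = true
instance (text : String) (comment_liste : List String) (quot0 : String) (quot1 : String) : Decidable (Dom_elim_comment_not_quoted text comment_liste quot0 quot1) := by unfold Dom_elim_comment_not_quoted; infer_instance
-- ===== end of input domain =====

-- B replaces A's "build the full unquoted-interval list, then minimise text.find over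
-- every interval × comment pair" with one left-to-right scan that cuts at the first
-- unquoted comment hit and exits early (objective: alternative decomposition).

-- ===== PORT A =====
-- while-loop of get_index_no_quot, ported with fuel: whenever len(quot0)+len(quot1) ≥ 1 the
-- Python loop advances istart by at least 1 per iteration, so fuel len(text)+1 suffices
-- (with quot0 = quot1 = "" and nonempty text the Python while loop never terminates)
def get_index_no_quot_go (text quot0 quot1 : String) (i1 lq0 lq1 : Int)
    (fuel : Nat) (istart : Int) : List (Int × Int) :=
  match fuel with
  | 0 => []
  | fuel + 1 =>
    if istart < i1 then
      let iendF := PySem.Str.findFrom text quot0 istart (some i1)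
      let iend := if iendF = -1 then i1 else iendF
      let here := if istart ≠ iend then [(istart, iend)] else []
      let i0 := PySem.Str.findFrom text quot1 (iend + lq0) (some i1)
      let istart' := if i0 = -1 then i1 else i0 + lq1
      here ++ get_index_no_quot_go text quot0 quot1 i1 lq0 lq1 fuel istart'
    else []

def get_index_no_quot (text quot0 quot1 : String) : List (Int × Int) :=
  get_index_no_quot_go text quot0 quot1 (PySem.Str.len text)
    (PySem.Str.len quot0) (PySem.Str.len quot1) (text.toList.length + 1) 0

def elim_comment_not_quoted (text : String) (comment_liste : List String) (quot0 : String) (quot1 : String) : String :=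
  let a_liste := get_index_no_quot text quot0 quot1
  let i0 := a_liste.foldl (fun i0 a =>
    comment_liste.foldl (fun i0 comment =>
      let b := PySem.Str.findFrom text comment a.1 (some a.2)
      if b > -1 then min b i0 else i0) i0) (PySem.Str.len text)
  PySem.Str.slice text (some 0) (some i0)

-- ===== PORT B =====
-- the single while-loop of Source B, same fuel convention as A's loop
def elim_scan_go (text : String) (comment_liste : List String) (quot0 quot1 : String)
    (n : Int) (fuel : Nat) (i : Int) : String :=
  match fuel with
  | 0 => text
  | fuel + 1 =>
    if i < n then
      let eF := PySem.Str.findFrom text quot0 i (some n)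
      let e := if eF = -1 then n else eF
      let best := if i ≠ e then
          comment_liste.foldl (fun best c =>
            let b := PySem.Str.findFrom text c i (some e)
            if b ≠ -1 ∧ (best = -1 ∨ b < best) then b else best) (-1)
        else -1
      if best ≠ -1 then PySem.Str.slice text none (some best)
      else
        let j := PySem.Str.findFrom text quot1 (e + PySem.Str.len quot0) (some n)
        if j = -1 then text
        else elim_scan_go text comment_liste quot0 quot1 n fuel (j + PySem.Str.len quot1)
    else text

def elim_comment_not_quoted_alt (text : String) (comment_liste : List String) (quot0 : String) (quot1 : String) : String :=
  elim_scan_go text comment_liste quot0 quot1 (PySem.Str.len text) (text.toList.length + 1) 0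

-- ===== PRECONDITION & SPEC =====
def Spec_elim_comment_not_quoted (text : String) (comment_liste : List String) (quot0 : String) (quot1 : String) (out : String) : Prop := out = elim_comment_not_quoted_alt text comment_liste quot0 quot1
instance (text : String) (comment_liste : List String) (quot0 : String) (quot1 : String) (out : String) : Decidable (Spec_elim_comment_not_quoted text comment_liste quot0 quot1 out) := by unfold Spec_elim_comment_not_quoted; infer_instance

-- ===== CLAIM (what is proved, stated in full; the proofs are below) =====
def Claim_equal_elim_comment_not_quoted : Prop := ∀ (text : String) (comment_liste : List String) (quot0 : String) (quot1 : String), Dom_elim_comment_not_quoted text comment_liste quot0 quot1 → Spec_elim_comment_not_quoted text comment_liste quot0 quot1 (elim_comment_not_quoted text comment_liste quot0 quot1)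

-- ===== LEMMAS AND PROOFS =====

-- A's nested minimisation over an interval list, as a named fold
def pvFoldP (text : String) (comment_liste : List String) (acc : Int) (L : List (Int × Int)) : Int :=
  L.foldl (fun i0 a =>
    comment_liste.foldl (fun i0 comment =>
      let b := PySem.Str.findFrom text comment a.1 (some a.2)
      if b > -1 then min b i0 else i0) i0) acc

lemma pvFoldP_nil (text : String) (cl : List String) (acc : Int) :
    pvFoldP text cl acc [] = acc := rfl

lemma pvFoldP_cons (text : String) (cl : List String) (a0 a1 acc : Int) (L : List (Int × Int)) :
    pvFoldP text cl acc ((a0, a1) :: L)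
      = pvFoldP text cl (cl.foldl (fun i0 comment =>
          let b := PySem.Str.findFrom text comment a0 (some a1)
          if b > -1 then min b i0 else i0) acc) L := rfl

lemma pv_ff_core (st e r : Int) (hst : 0 ≤ st) (hr : -1 ≤ r) :
    -1 ≤ (if e < st then (-1 : Int) else if r = -1 then -1 else st + r) := by
  split_ifs <;> omega

lemma pv_ff_ge_neg_one (s sub : List Char) (st : Int) (e? : Option Int) :
    -1 ≤ PySem.Chars.findFrom s sub st e? := by
  simp only [PySem.Chars.findFrom]
  apply pv_ff_core
  · split_ifs <;> omega
  · exact PySem.Chars.neg_one_le_find _ _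

-- findFrom with in-range nonnegative bounds, in closed form
lemma pv_ff_some_eq (s sub : List Char) (st E : Int) (hst : 0 ≤ st) (hE0 : 0 ≤ E)
    (hEn : E ≤ (s.length : Int)) :
    PySem.Chars.findFrom s sub st (some E) =
      (if E < st then -1 else
        if PySem.Chars.find (List.drop st.toNat (List.take E.toNat s)) sub = -1 then -1
        else st + PySem.Chars.find (List.drop st.toNat (List.take E.toNat s)) sub) := by
  simp only [PySem.Chars.findFrom]
  rw [if_neg (not_lt.mpr hEn), if_neg (not_lt.mpr hE0), if_neg (not_lt.mpr hst)]

-- bounds of text.find(sub, st, E) on a successful search with in-range Nat-like bounds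
lemma pv_ff_bounds (s sub : List Char) (st E : Int) (hst : 0 ≤ st) (hE0 : 0 ≤ E)
    (hEn : E ≤ (s.length : Int)) (h : PySem.Chars.findFrom s sub st (some E) ≠ -1) :
    st ≤ PySem.Chars.findFrom s sub st (some E) ∧
      PySem.Chars.findFrom s sub st (some E) + (sub.length : Int) ≤ E ∧
      (sub = [] → PySem.Chars.findFrom s sub st (some E) = st) := by
  rw [pv_ff_some_eq s sub st E hst hE0 hEn] at h ⊢
  have hlt : ((List.drop st.toNat (List.take E.toNat s)).length : Int) = E - st := by
    push_cast [List.length_drop, List.length_take]; omega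
  split_ifs at h ⊢ with h1 h2
  · exact absurd rfl h
  · exact absurd rfl h
  · generalize hg : List.drop st.toNat (List.take E.toNat s) = t at hlt h2 ⊢
    have hr0 : 0 ≤ PySem.Chars.find t sub := by
      have := PySem.Chars.neg_one_le_find t sub; omega
    have hsp := (PySem.Chars.find_spec hr0).1
    have hlen : sub.length ≤ t.length - (PySem.Chars.find t sub).toNat := by
      have h3 := hsp.length_le
      rwa [List.length_drop] at h3
    have hfl := PySem.Chars.find_le_length t sub
    refine ⟨by omega, by omega, fun hnil => ?_⟩
    subst hnil
    rw [PySem.Chars.find_nil]; ring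

-- Str-level wrappers of the two findFrom facts
lemma pv_sff_ge_neg_one (text sub : String) (st : Int) (e? : Option Int) :
    -1 ≤ PySem.Str.findFrom text sub st e? := pv_ff_ge_neg_one _ _ _ _

lemma pv_sff_bounds (text sub : String) (st E : Int) (hst : 0 ≤ st) (hE0 : 0 ≤ E)
    (hEn : E ≤ PySem.Str.len text) (h : PySem.Str.findFrom text sub st (some E) ≠ -1) :
    st ≤ PySem.Str.findFrom text sub st (some E) ∧
      PySem.Str.findFrom text sub st (some E) + (sub.toList.length : Int) ≤ E ∧
      (sub.toList = [] → PySem.Str.findFrom text sub st (some E) = st) := by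
  simp only [PySem.Str.findFrom, PySem.Str.len] at *
  exact pv_ff_bounds text.toList sub.toList st E hst hE0 hEn h

lemma pv_len_nonneg (q : String) : (0:Int) ≤ PySem.Str.len q := by
  simp [PySem.Str.len]

lemma pv_gen_none (text quot0 quot1 : String) (i1 lq0 lq1 : Int) (fuel : Nat) (istart : Int)
    (h : ¬ istart < i1) :
    get_index_no_quot_go text quot0 quot1 i1 lq0 lq1 fuel istart = [] := by
  cases fuel <;> simp [get_index_no_quot_go, h]

-- processing one interval (a0, a1) leaves an accumulator that is ≤ a0 unchanged
lemma pv_inner_keep (text : String) (comment_liste : List String) (a0 a1 : Int)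
    (h0 : 0 ≤ a0) (h1 : 0 ≤ a1) (hn : a1 ≤ (text.toList.length : Int)) :
    ∀ (cl : List String) (acc : Int), acc ≤ a0 →
      cl.foldl (fun i0 comment =>
        let b := PySem.Str.findFrom text comment a0 (some a1)
        if b > -1 then min b i0 else i0) acc = acc := by
  intro cl
  induction cl with
  | nil => intro acc _; rfl
  | cons c cl ih =>
    intro acc hacc
    simp only [List.foldl_cons]
    have hmin : (if PySem.Str.findFrom text c a0 (some a1) > -1
        then min (PySem.Str.findFrom text c a0 (some a1)) acc else acc) = acc := by
      by_cases hb : PySem.Str.findFrom text c a0 (some a1) > -1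
      · rw [if_pos hb]
        have hbb := pv_sff_bounds text c a0 a1 h0 h1 (by simpa [PySem.Str.len] using hn)
          (by omega)
        omega
      · rw [if_neg hb]
    rw [hmin]
    exact ih acc hacc

-- the whole fold leaves an accumulator ≤ istart unchanged
lemma pv_mono_fold (text quot0 quot1 : String) (comment_liste : List String) :
    ∀ (fuel : Nat) (i acc : Int), 0 ≤ i → acc ≤ i →
      pvFoldP text comment_liste acc
        (get_index_no_quot_go text quot0 quot1 (PySem.Str.len text)
          (PySem.Str.len quot0) (PySem.Str.len quot1) fuel i) = acc := by
  intro fuel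
  induction fuel with
  | zero => intro i acc _ _; rfl
  | succ fuel ih =>
    intro i acc hi hacc
    by_cases hin : i < PySem.Str.len text
    · simp only [get_index_no_quot_go, if_pos hin]
      have hln : (0:Int) ≤ PySem.Str.len text := pv_len_nonneg text
      set eF := PySem.Str.findFrom text quot0 i (some (PySem.Str.len text)) with heF
      set e := if eF = -1 then PySem.Str.len text else eF with he
      have hee : i ≤ e ∧ 0 ≤ e ∧ e ≤ PySem.Str.len text := by
        rcases eq_or_ne eF (-1) with hE | hE
        · rw [he, if_pos hE]; omega
        · have := pv_sff_bounds text quot0 i (PySem.Str.len text) hi hln le_rfl hE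
          have hq0 := pv_len_nonneg quot0
          rw [he, if_neg hE]
          simp only [PySem.Str.len] at *
          omega
      set j := PySem.Str.findFrom text quot1 (e + PySem.Str.len quot0) (some (PySem.Str.len text)) with hj
      set i' := if j = -1 then PySem.Str.len text else j + PySem.Str.len quot1 with hi'
      have hii : e ≤ i' ∧ 0 ≤ i' := by
        rcases eq_or_ne j (-1) with hJ | hJ
        · rw [hi', if_pos hJ]; omega
        · have := pv_sff_bounds text quot1 (e + PySem.Str.len quot0) (PySem.Str.len text)
            (by have := pv_len_nonneg quot0; omega) hln le_rfl hJ
          have hq0 := pv_len_nonneg quot0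
          have hq1 := pv_len_nonneg quot1
          rw [hi', if_neg hJ]
          omega
      have hrest := ih i' acc (by omega) (by omega)
      by_cases hne : i ≠ e
      · rw [if_pos hne, List.singleton_append, pvFoldP_cons]
        have hkeep := pv_inner_keep text comment_liste i e hi hee.2.1
          (by simpa [PySem.Str.len] using hee.2.2) comment_liste acc hacc
        rw [hkeep]
        exact hrest
      · rw [if_neg hne, List.nil_append]
        exact hrest
    · rw [pv_gen_none _ _ _ _ _ _ _ _ hin]; rfl

-- A's min-fold over one interval's comments versus B's first-earliest-hit loop
lemma pv_inner_AB (text : String) (a0 a1 : Int) :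
    ∀ (cl : List String) (best acc : Int), -1 ≤ best →
      cl.foldl (fun i0 comment =>
        let b := PySem.Str.findFrom text comment a0 (some a1)
        if b > -1 then min b i0 else i0) (if best = -1 then acc else min best acc)
      = (let r := cl.foldl (fun best c =>
            let b := PySem.Str.findFrom text c a0 (some a1)
            if b ≠ -1 ∧ (best = -1 ∨ b < best) then b else best) best;
         if r = -1 then acc else min r acc) := by
  intro cl
  induction cl with
  | nil => intro best acc _; rfl
  | cons c cl ih =>
    intro best acc hbest
    simp only [List.foldl_cons]
    have hb := pv_sff_ge_neg_one text c a0 (some a1)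
    set b := PySem.Str.findFrom text c a0 (some a1) with hbdef
    have hacc : (if b > -1 then min b (if best = -1 then acc else min best acc)
          else if best = -1 then acc else min best acc)
        = (if (if b ≠ -1 ∧ (best = -1 ∨ b < best) then b else best) = -1 then acc
           else min (if b ≠ -1 ∧ (best = -1 ∨ b < best) then b else best) acc) := by
      split_ifs <;> omega
    rw [hacc]
    exact ih _ acc (by split_ifs <;> omega)

-- B's best over one interval is -1 or a position inside the interval
lemma pv_best_bounds (text : String) (a0 a1 : Int) (h0 : 0 ≤ a0) (ha : a0 < a1)
    (hn : a1 ≤ (text.toList.length : Int)) :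
    ∀ (cl : List String) (best : Int), best = -1 ∨ (a0 ≤ best ∧ best < a1) →
      (cl.foldl (fun best c =>
          let b := PySem.Str.findFrom text c a0 (some a1)
          if b ≠ -1 ∧ (best = -1 ∨ b < best) then b else best) best) = -1 ∨
        (a0 ≤ cl.foldl (fun best c =>
          let b := PySem.Str.findFrom text c a0 (some a1)
          if b ≠ -1 ∧ (best = -1 ∨ b < best) then b else best) best ∧
         cl.foldl (fun best c =>
          let b := PySem.Str.findFrom text c a0 (some a1)
          if b ≠ -1 ∧ (best = -1 ∨ b < best) then b else best) best < a1) := by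
  intro cl
  induction cl with
  | nil => intro best h; exact h
  | cons c cl ih =>
    intro best hb
    simp only [List.foldl_cons]
    refine ih _ ?_
    by_cases hc : PySem.Str.findFrom text c a0 (some a1) ≠ -1 ∧
        (best = -1 ∨ PySem.Str.findFrom text c a0 (some a1) < best)
    · rw [if_pos hc]
      have hbb := pv_sff_bounds text c a0 a1 h0 (by omega)
        (by simpa [PySem.Str.len] using hn) hc.1
      right
      constructor
      · exact hbb.1
      · by_cases hnil : c.toList = []
        · have := hbb.2.2 hnil; omega
        · have hl : 1 ≤ (c.toList.length : Int) := by
            have := List.length_pos_iff.mpr hnil; omega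
          omega
    · rw [if_neg hc]; exact hb

lemma pv_slice_all (text : String) :
    PySem.Str.slice text none (some (PySem.Str.len text)) = text := by
  simp [PySem.Str.slice, PySem.Str.len, PySem.Chars.slice_eq_listSlice]
  rw [show text.length = text.toList.length from Eq.symm String.length_toList,
    List.take_length, String.ofList_toList]

-- main loop correspondence
lemma pv_main (text quot0 quot1 : String) (comment_liste : List String) :
    ∀ (fuel : Nat) (i : Int), 0 ≤ i →
      elim_scan_go text comment_liste quot0 quot1 (PySem.Str.len text) fuel i
        = PySem.Str.slice text none (some (pvFoldP text comment_liste (PySem.Str.len text)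
            (get_index_no_quot_go text quot0 quot1 (PySem.Str.len text)
              (PySem.Str.len quot0) (PySem.Str.len quot1) fuel i))) := by
  intro fuel
  induction fuel with
  | zero =>
    intro i hi
    rw [show get_index_no_quot_go text quot0 quot1 (PySem.Str.len text)
        (PySem.Str.len quot0) (PySem.Str.len quot1) 0 i = [] from rfl, pvFoldP_nil]
    exact (pv_slice_all text).symm
  | succ fuel ih =>
    intro i hi
    by_cases hin : i < PySem.Str.len text
    · simp only [elim_scan_go, get_index_no_quot_go, if_pos hin]
      have hln : (0:Int) ≤ PySem.Str.len text := pv_len_nonneg text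
      set eF := PySem.Str.findFrom text quot0 i (some (PySem.Str.len text)) with heF
      set e := if eF = -1 then PySem.Str.len text else eF with he
      have hee : i ≤ e ∧ 0 ≤ e ∧ e ≤ PySem.Str.len text := by
        rcases eq_or_ne eF (-1) with hE | hE
        · rw [he, if_pos hE]; omega
        · have := pv_sff_bounds text quot0 i (PySem.Str.len text) hi hln le_rfl hE
          have hq0 := pv_len_nonneg quot0
          rw [he, if_neg hE]
          simp only [PySem.Str.len] at *
          omega
      set j := PySem.Str.findFrom text quot1 (e + PySem.Str.len quot0) (some (PySem.Str.len text)) with hj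
      have hjj : j ≠ -1 → e ≤ j + PySem.Str.len quot1 ∧ 0 ≤ j + PySem.Str.len quot1 ∧
          j + PySem.Str.len quot1 ≤ PySem.Str.len text := by
        intro hJ
        have := pv_sff_bounds text quot1 (e + PySem.Str.len quot0) (PySem.Str.len text)
          (by have := pv_len_nonneg quot0; omega) hln le_rfl hJ
        have hq0 := pv_len_nonneg quot0
        have hq1 := pv_len_nonneg quot1
        simp only [PySem.Str.len] at *
        omega
      set best := (if i ≠ e then
          comment_liste.foldl (fun best c =>
            let b := PySem.Str.findFrom text c i (some e)
            if b ≠ -1 ∧ (best = -1 ∨ b < best) then b else best) (-1)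
        else (-1:Int)) with hbestdef
      -- A-side: the fold over the (possibly empty) head interval equals `combine len best`
      have hA : pvFoldP text comment_liste (PySem.Str.len text)
            ((if i ≠ e then [(i, e)] else []) ++ get_index_no_quot_go text quot0 quot1
              (PySem.Str.len text) (PySem.Str.len quot0) (PySem.Str.len quot1) fuel
              (if j = -1 then PySem.Str.len text else j + PySem.Str.len quot1))
          = pvFoldP text comment_liste (if best = -1 then PySem.Str.len text else min best (PySem.Str.len text))
              (get_index_no_quot_go text quot0 quot1
                (PySem.Str.len text) (PySem.Str.len quot0) (PySem.Str.len quot1) fuel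
                (if j = -1 then PySem.Str.len text else j + PySem.Str.len quot1)) := by
        by_cases hne : i ≠ e
        · rw [if_pos hne, List.singleton_append, pvFoldP_cons]
          have := pv_inner_AB text i e comment_liste (-1) (PySem.Str.len text) (by omega)
          rw [if_pos rfl] at this
          rw [this]
          rw [hbestdef, if_pos hne]
        · rw [if_neg hne, List.nil_append, hbestdef, if_neg hne, if_pos rfl]
      rw [hA]
      by_cases hbest : best = -1
      · -- no unquoted comment in this stretch: both sides continue with the next istart
        rw [if_neg (by simp [hbest] : ¬ best ≠ -1), if_pos hbest]
        rcases eq_or_ne j (-1) with hJ | hJ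
        · rw [if_pos hJ, if_pos hJ, pv_gen_none _ _ _ _ _ _ _ _ (lt_irrefl _), pvFoldP_nil]
          exact (pv_slice_all text).symm
        · rw [if_neg hJ, if_neg hJ]
          exact ih (j + PySem.Str.len quot1) (hjj hJ).2.1
      · -- earliest unquoted comment hit: B returns here, A's remaining fold keeps it
        have hne : i ≠ e := by
          by_contra hc
          rw [hbestdef, if_neg (fun h => h hc)] at hbest
          exact hbest rfl
        have hib : i ≤ best ∧ best < e := by
          have hb := pv_best_bounds text i e hi (by omega)
            (by simpa [PySem.Str.len] using hee.2.2) comment_liste (-1) (Or.inl rfl)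
          rw [hbestdef, if_pos hne] at hbest ⊢
          rcases hb with hb | hb
          · exact absurd hb hbest
          · exact hb
        rw [if_pos hbest]
        have hminb : min best (PySem.Str.len text) = best := by omega
        rw [hminb, if_neg hbest]
        have hkeep : pvFoldP text comment_liste best
            (get_index_no_quot_go text quot0 quot1
              (PySem.Str.len text) (PySem.Str.len quot0) (PySem.Str.len quot1) fuel
              (if j = -1 then PySem.Str.len text else j + PySem.Str.len quot1)) = best := by
          rcases eq_or_ne j (-1) with hJ | hJ
          · rw [if_pos hJ]
            exact pv_mono_fold text quot0 quot1 comment_liste fuel _ best hln (by omega)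
          · rw [if_neg hJ]
            exact pv_mono_fold text quot0 quot1 comment_liste fuel _ best (hjj hJ).2.1
              (by have := (hjj hJ).1; omega)
        rw [hkeep]
    · rw [elim_scan_go, if_neg hin, pv_gen_none _ _ _ _ _ _ _ _ hin, pvFoldP_nil]
      exact (pv_slice_all text).symm

-- ===== VERDICT (by name: the statement is the Claim_ definition above) =====
theorem elim_comment_not_quoted_spec : Claim_equal_elim_comment_not_quoted := by
  intro text comment_liste quot0 quot1 _
  unfold Spec_elim_comment_not_quoted elim_comment_not_quoted elim_comment_not_quoted_alt
    get_index_no_quot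
  rw [pv_main text quot0 quot1 comment_liste (text.toList.length + 1) 0 le_rfl]
  show PySem.Str.slice text (some 0) _ = _
  rw [show ∀ x, PySem.Str.slice text (some 0) x = PySem.Str.slice text none x from ?_]
  · rfl
  · intro x
    simp [PySem.Str.slice, PySem.Chars.slice_eq_listSlice]
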